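-- pv_equiv track=rewrite | github.com/Xalva3000/project_5_lovecraft_bot | services/next_unordered_number.py | next_unordered_number
-- ===== SOURCE A (Python) =====
-- from itertools import cycle
--
-- def next_unordered_number(lst: list[int], current_number: int, backward=False):
--     """В неупорядоченной последовательности находит следующее число
--     (по умолчанию в стороне увеличения чисел).
--     Можно указать, что следующее число нужно искать
--     в сторону уменьшения чисел."""
--
--     if not lst:
--         return
--
--     if current_number not in lst or len(lst) == 1:
--         return lst[0]
--
--     cycled_lst = cycle(sorted(lst, reverse=backward))
--
--     for _ in range(len(lst)+1):
--         if next(cycled_lst) == current_number: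
--             return next(cycled_lst)
--     return lst[0]
-- ===== SOURCE B (Python) =====
-- def next_unordered_number(lst: list[int], current_number: int, backward=False):
--     """Single linear pass instead of sort + cyclic scan: tracks the occurrence
--     count of current_number, the global min/max, and the nearest strictly
--     greater/smaller elements, from which the answer is read off directly."""
--     if not lst:
--         return
--     cnt = 0
--     mn = mx = lst[0]
--     up = None
--     down = None
--     for x in lst:
--         if x == current_number:
--             cnt += 1
--         if x < mn:
--             mn = x
--         if x > mx:
--             mx = x
--         if x > current_number and (up is None or x < up):
--             up = x
--         if x < current_number and (down is None or x > down):
--             down = x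
--     if cnt == 0 or len(lst) == 1:
--         return lst[0]
--     if cnt >= 2:
--         return current_number
--     if backward:
--         return down if down is not None else mx
--     return up if up is not None else mn
-- ===== Notes on version B (the rewrite author's own statement) =====
-- stated objective: alternative
-- what changed: Replaced sort-then-cyclic-scan (sorted + itertools.cycle) by a single linear pass that tracks the count of current_number, the global min/max, and the nearest strictly greater/smaller elements, from which the cyclic successor in the sorted order is read off directly.
import Mathlib
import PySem

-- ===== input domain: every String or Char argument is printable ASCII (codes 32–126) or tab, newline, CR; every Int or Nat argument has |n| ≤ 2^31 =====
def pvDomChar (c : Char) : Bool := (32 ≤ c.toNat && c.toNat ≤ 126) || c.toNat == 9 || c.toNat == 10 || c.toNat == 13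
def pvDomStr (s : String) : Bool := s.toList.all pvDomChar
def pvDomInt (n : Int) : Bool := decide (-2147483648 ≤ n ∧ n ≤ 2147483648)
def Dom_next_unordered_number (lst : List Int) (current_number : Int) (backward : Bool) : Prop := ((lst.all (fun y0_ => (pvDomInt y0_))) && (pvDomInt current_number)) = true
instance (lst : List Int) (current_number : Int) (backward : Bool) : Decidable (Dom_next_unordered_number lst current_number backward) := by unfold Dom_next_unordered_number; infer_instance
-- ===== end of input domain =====

-- B replaces A's sort-then-cycle scan with one linear pass tracking the count of
-- current_number, the global min/max and the nearest strictly greater/smaller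
-- elements (a different algorithm of similar measured cost; objective: alternative).

-- ===== PORT A =====
-- itertools.cycle over the sorted list, consumed by `for _ in range(len(lst)+1)` with an
-- extra `next` on a match, is exactly: iteration k reads element (k mod n) and, on a match,
-- returns element ((k+1) mod n); fuel counts the remaining iterations of the range loop.
def nunCycleLoop (s : List Int) (current_number : Int) (k : Nat) : Nat → Option Int
  | 0 => none   -- range exhausted: fall through to `return lst[0]`
  | fuel + 1 =>
    if s.getD (k % s.length) 0 = current_number then
      some (s.getD ((k + 1) % s.length) 0)
    else nunCycleLoop s current_number (k + 1) fuel

def next_unordered_number (lst : List Int) (current_number : Int) (backward : Bool) : Option Int :=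
  match lst with
  | [] => none
  | x0 :: _ =>
    if current_number ∉ lst ∨ lst.length = 1 then some x0
    else
      let s := PySem.List.sorted lst (fun x => x) backward
      some ((nunCycleLoop s current_number 0 (lst.length + 1)).getD x0)

-- ===== PORT B =====
-- one step of Source B's single pass: (cnt, mn, mx, up, down)
def nunStep (c : Int) (st : Int × Int × Int × Option Int × Option Int) (x : Int) :
    Int × Int × Int × Option Int × Option Int :=
  match st with
  | (cnt, mn, mx, up, down) =>
    ( if x = c then cnt + 1 else cnt,
      if x < mn then x else mn,
      if mx < x then x else mx,
      if decide (c < x) && up.elim true (fun u => decide (x < u)) then some x else up,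
      if decide (x < c) && down.elim true (fun d => decide (d < x)) then some x else down )

def next_unordered_number_alt (lst : List Int) (current_number : Int) (backward : Bool) : Option Int :=
  match lst with
  | [] => none
  | x0 :: _ =>
    match lst.foldl (nunStep current_number) (0, x0, x0, none, none) with
    | (cnt, mn, mx, up, down) =>
      if cnt = 0 ∨ lst.length = 1 then some x0
      else if 2 ≤ cnt then some current_number
      else if backward then some (down.getD mx)
      else some (up.getD mn)

-- ===== PRECONDITION & SPEC =====
def Spec_next_unordered_number (lst : List Int) (current_number : Int) (backward : Bool) (out : Option Int) : Prop := out = next_unordered_number_alt lst current_number backward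
instance (lst : List Int) (current_number : Int) (backward : Bool) (out : Option Int) : Decidable (Spec_next_unordered_number lst current_number backward out) := by unfold Spec_next_unordered_number; infer_instance

-- ===== CLAIM (what is proved, stated in full; the proofs are below) =====
def Claim_equal_next_unordered_number : Prop := ∀ (lst : List Int) (current_number : Int) (backward : Bool), Dom_next_unordered_number lst current_number backward → Spec_next_unordered_number lst current_number backward (next_unordered_number lst current_number backward)

-- ===== LEMMAS AND PROOFS =====

-- the five independent folds hidden in nunStep
def cntF (c : Int) : Int → Int → Int := fun a x => if x = c then a + 1 else a
def mnF : Int → Int → Int := fun m x => if x < m then x else m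
def mxF : Int → Int → Int := fun m x => if m < x then x else m
def upF (c : Int) : Option Int → Int → Option Int :=
  fun u x => if decide (c < x) && u.elim true (fun v => decide (x < v)) then some x else u
def dnF (c : Int) : Option Int → Int → Option Int :=
  fun d x => if decide (x < c) && d.elim true (fun v => decide (v < x)) then some x else d

lemma nunFold_eq (c : Int) (l : List Int) (cnt mn mx : Int) (up down : Option Int) :
    l.foldl (nunStep c) (cnt, mn, mx, up, down) =
      (l.foldl (cntF c) cnt, l.foldl mnF mn, l.foldl mxF mx,
       l.foldl (upF c) up, l.foldl (dnF c) down) := by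
  induction l generalizing cnt mn mx up down with
  | nil => rfl
  | cons y t ih => simp only [List.foldl_cons, nunStep, ih]; rfl

lemma cntF_spec (c : Int) (l : List Int) (a : Int) :
    l.foldl (cntF c) a = a + (l.count c : Int) := by
  induction l generalizing a with
  | nil => simp
  | cons y t ih =>
      simp only [List.foldl_cons, cntF, ih, List.count_cons]
      by_cases h : y = c
      · simp [h]; omega
      · simp [h]

lemma mnF_spec (l : List Int) (m : Int) :
    (l.foldl mnF m = m ∨ l.foldl mnF m ∈ l) ∧
      l.foldl mnF m ≤ m ∧ ∀ x ∈ l, l.foldl mnF m ≤ x := by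
  induction l generalizing m with
  | nil => simp
  | cons y t ih =>
    simp only [List.foldl_cons]
    obtain ⟨hmem, hle, hall⟩ := ih (mnF m y)
    have h1 : mnF m y ≤ m := by unfold mnF; split <;> omega
    have h2 : mnF m y ≤ y := by unfold mnF; split <;> omega
    have h3 : mnF m y = m ∨ mnF m y = y := by unfold mnF; split <;> simp
    refine ⟨?_, le_trans hle h1, ?_⟩
    · rcases hmem with h | h
      · rw [h]; rcases h3 with hc | hc
        · exact Or.inl hc
        · exact Or.inr (by simp [hc])
      · simp [h]
    · intro x hx
      rcases List.mem_cons.mp hx with rfl | hx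
      · exact le_trans hle h2
      · exact hall x hx

lemma mxF_spec (l : List Int) (m : Int) :
    (l.foldl mxF m = m ∨ l.foldl mxF m ∈ l) ∧
      m ≤ l.foldl mxF m ∧ ∀ x ∈ l, x ≤ l.foldl mxF m := by
  induction l generalizing m with
  | nil => simp
  | cons y t ih =>
    simp only [List.foldl_cons]
    obtain ⟨hmem, hle, hall⟩ := ih (mxF m y)
    have h1 : m ≤ mxF m y := by unfold mxF; split <;> omega
    have h2 : y ≤ mxF m y := by unfold mxF; split <;> omega
    have h3 : mxF m y = m ∨ mxF m y = y := by unfold mxF; split <;> simp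
    refine ⟨?_, le_trans h1 hle, ?_⟩
    · rcases hmem with h | h
      · rw [h]; rcases h3 with hc | hc
        · exact Or.inl hc
        · exact Or.inr (by simp [hc])
      · simp [h]
    · intro x hx
      rcases List.mem_cons.mp hx with rfl | hx
      · exact le_trans h2 hle
      · exact hall x hx

lemma upF_step_none (c y : Int) : upF c none y = if c < y then some y else none := by
  by_cases h : c < y <;> simp [upF, h]

lemma upF_step_some (c v y : Int) :
    upF c (some v) y = if c < y ∧ y < v then some y else some v := by
  by_cases h1 : c < y <;> by_cases h2 : y < v <;> simp [upF, h1, h2]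

lemma dnF_step_none (c y : Int) : dnF c none y = if y < c then some y else none := by
  by_cases h : y < c <;> simp [dnF, h]

lemma dnF_step_some (c v y : Int) :
    dnF c (some v) y = if y < c ∧ v < y then some y else some v := by
  by_cases h1 : y < c <;> by_cases h2 : v < y <;> simp [dnF, h1, h2]

lemma upF_none_iff (c : Int) (l : List Int) (acc : Option Int) :
    l.foldl (upF c) acc = none ↔ acc = none ∧ ∀ x ∈ l, ¬ c < x := by
  induction l generalizing acc with
  | nil => simp
  | cons y t ih =>
    have hstep : upF c acc y = none ↔ acc = none ∧ ¬ c < y := by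
      cases acc with
      | none => rw [upF_step_none]; split <;> simp_all
      | some v => rw [upF_step_some]; split <;> simp
    simp only [List.foldl_cons, ih, hstep, List.mem_cons]
    constructor
    · rintro ⟨⟨h1, h2⟩, h3⟩
      exact ⟨h1, fun x hx => hx.elim (fun e => e ▸ h2) (h3 x)⟩
    · rintro ⟨h1, h2⟩
      exact ⟨⟨h1, h2 y (Or.inl rfl)⟩, fun x hx => h2 x (Or.inr hx)⟩

lemma dnF_none_iff (c : Int) (l : List Int) (acc : Option Int) :
    l.foldl (dnF c) acc = none ↔ acc = none ∧ ∀ x ∈ l, ¬ x < c := by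
  induction l generalizing acc with
  | nil => simp
  | cons y t ih =>
    have hstep : dnF c acc y = none ↔ acc = none ∧ ¬ y < c := by
      cases acc with
      | none => rw [dnF_step_none]; split <;> simp_all
      | some v => rw [dnF_step_some]; split <;> simp
    simp only [List.foldl_cons, ih, hstep, List.mem_cons]
    constructor
    · rintro ⟨⟨h1, h2⟩, h3⟩
      exact ⟨h1, fun x hx => hx.elim (fun e => e ▸ h2) (h3 x)⟩
    · rintro ⟨h1, h2⟩
      exact ⟨⟨h1, h2 y (Or.inl rfl)⟩, fun x hx => h2 x (Or.inr hx)⟩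

lemma upF_some_spec (c : Int) (l : List Int) : ∀ (acc : Option Int),
    (∀ v, acc = some v → c < v) →
    ∀ u, l.foldl (upF c) acc = some u →
      c < u ∧ (u ∈ l ∨ acc = some u) ∧ (∀ w, acc = some w → u ≤ w) ∧
        ∀ x ∈ l, c < x → u ≤ x := by
  induction l with
  | nil =>
    intro acc hg u hu; simp at hu; subst hu
    exact ⟨hg u rfl, Or.inr rfl, fun w hw => by injection hw with h; omega, by simp⟩
  | cons y t ih =>
    intro acc hg u hu
    simp only [List.foldl_cons] at hu
    cases acc with
    | none =>
      rw [upF_step_none] at hu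
      by_cases hy : c < y
      · rw [if_pos hy] at hu
        obtain ⟨h1, h2, h3, h4⟩ := ih (some y) (fun v hv => by injection hv with h; omega) u hu
        refine ⟨h1, ?_, fun w hw => by simp at hw, ?_⟩
        · rcases h2 with h | h
          · exact Or.inl (List.mem_cons_of_mem _ h)
          · exact Or.inl (by simp [Option.some.inj h])
        · intro x hx hcx
          rcases List.mem_cons.mp hx with rfl | hx
          · exact h3 x rfl
          · exact h4 x hx hcx
      · rw [if_neg hy] at hu
        obtain ⟨h1, h2, h3, h4⟩ := ih none (fun v hv => by simp at hv) u hu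
        refine ⟨h1, ?_, fun w hw => by simp at hw, ?_⟩
        · rcases h2 with h | h
          · exact Or.inl (List.mem_cons_of_mem _ h)
          · cases h
        · intro x hx hcx
          rcases List.mem_cons.mp hx with rfl | hx
          · exact absurd hcx hy
          · exact h4 x hx hcx
    | some v =>
      rw [upF_step_some] at hu
      have hcv : c < v := hg v rfl
      by_cases hcond : c < y ∧ y < v
      · rw [if_pos hcond] at hu
        obtain ⟨h1, h2, h3, h4⟩ := ih (some y) (fun w hw => by injection hw with h; omega) u hu
        have huy : u ≤ y := h3 y rfl
        refine ⟨h1, ?_, ?_, ?_⟩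
        · rcases h2 with h | h
          · exact Or.inl (List.mem_cons_of_mem _ h)
          · exact Or.inl (by simp [Option.some.inj h])
        · intro w hw; injection hw with h; omega
        · intro x hx hcx
          rcases List.mem_cons.mp hx with rfl | hx
          · exact huy
          · exact h4 x hx hcx
      · rw [if_neg hcond] at hu
        obtain ⟨h1, h2, h3, h4⟩ := ih (some v) hg u hu
        have huv : u ≤ v := h3 v rfl
        refine ⟨h1, ?_, fun w hw => by injection hw with h; omega, ?_⟩
        · rcases h2 with h | h
          · exact Or.inl (List.mem_cons_of_mem _ h)
          · exact Or.inr h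
        · intro x hx hcx
          rcases List.mem_cons.mp hx with rfl | hx
          · have : ¬ x < v := fun h => hcond ⟨hcx, h⟩
            omega
          · exact h4 x hx hcx

lemma dnF_some_spec (c : Int) (l : List Int) : ∀ (acc : Option Int),
    (∀ v, acc = some v → v < c) →
    ∀ u, l.foldl (dnF c) acc = some u →
      u < c ∧ (u ∈ l ∨ acc = some u) ∧ (∀ w, acc = some w → w ≤ u) ∧
        ∀ x ∈ l, x < c → x ≤ u := by
  induction l with
  | nil =>
    intro acc hg u hu; simp at hu; subst hu
    exact ⟨hg u rfl, Or.inr rfl, fun w hw => by injection hw with h; omega, by simp⟩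
  | cons y t ih =>
    intro acc hg u hu
    simp only [List.foldl_cons] at hu
    cases acc with
    | none =>
      rw [dnF_step_none] at hu
      by_cases hy : y < c
      · rw [if_pos hy] at hu
        obtain ⟨h1, h2, h3, h4⟩ := ih (some y) (fun v hv => by injection hv with h; omega) u hu
        refine ⟨h1, ?_, fun w hw => by simp at hw, ?_⟩
        · rcases h2 with h | h
          · exact Or.inl (List.mem_cons_of_mem _ h)
          · exact Or.inl (by simp [Option.some.inj h])
        · intro x hx hcx
          rcases List.mem_cons.mp hx with rfl | hx
          · exact h3 x rfl
          · exact h4 x hx hcx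
      · rw [if_neg hy] at hu
        obtain ⟨h1, h2, h3, h4⟩ := ih none (fun v hv => by simp at hv) u hu
        refine ⟨h1, ?_, fun w hw => by simp at hw, ?_⟩
        · rcases h2 with h | h
          · exact Or.inl (List.mem_cons_of_mem _ h)
          · cases h
        · intro x hx hcx
          rcases List.mem_cons.mp hx with rfl | hx
          · exact absurd hcx hy
          · exact h4 x hx hcx
    | some v =>
      rw [dnF_step_some] at hu
      have hcv : v < c := hg v rfl
      by_cases hcond : y < c ∧ v < y
      · rw [if_pos hcond] at hu
        obtain ⟨h1, h2, h3, h4⟩ := ih (some y) (fun w hw => by injection hw with h; omega) u hu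
        have huy : y ≤ u := h3 y rfl
        refine ⟨h1, ?_, ?_, ?_⟩
        · rcases h2 with h | h
          · exact Or.inl (List.mem_cons_of_mem _ h)
          · exact Or.inl (by simp [Option.some.inj h])
        · intro w hw; injection hw with h; omega
        · intro x hx hcx
          rcases List.mem_cons.mp hx with rfl | hx
          · exact huy
          · exact h4 x hx hcx
      · rw [if_neg hcond] at hu
        obtain ⟨h1, h2, h3, h4⟩ := ih (some v) hg u hu
        have huv : v ≤ u := h3 v rfl
        refine ⟨h1, ?_, fun w hw => by injection hw with h; omega, ?_⟩
        · rcases h2 with h | h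
          · exact Or.inl (List.mem_cons_of_mem _ h)
          · exact Or.inr h
        · intro x hx hcx
          rcases List.mem_cons.mp hx with rfl | hx
          · have : ¬ v < x := fun h => hcond ⟨hcx, h⟩
            omega
          · exact h4 x hx hcx

lemma nunCycleLoop_run (s : List Int) (c : Int) (i : Nat) (hi : i < s.length)
    (hfirst : ∀ j (hj : j < i), s[j]'(lt_trans hj hi) ≠ c) (hsi : s[i]'hi = c) :
    ∀ (fuel k : Nat), k ≤ i → i < k + fuel →
      nunCycleLoop s c k fuel = some (s.getD ((i + 1) % s.length) 0) := by
  intro fuel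
  induction fuel with
  | zero => intro k hk hlt; omega
  | succ f ih =>
    intro k hk hlt
    have hkn : k < s.length := lt_of_le_of_lt hk hi
    have hmod : k % s.length = k := Nat.mod_eq_of_lt hkn
    rcases eq_or_lt_of_le hk with rfl | hklt
    · simp [nunCycleLoop, hmod, List.getElem?_eq_getElem hkn, hsi]
    · have hne := hfirst k hklt
      have hget : s.getD (k % s.length) 0 = s[k] := by
        rw [hmod]; simp [List.getElem?_eq_getElem hkn]
      rw [nunCycleLoop, hget, if_neg hne]
      exact ih (k + 1) hklt (by omega)

-- the heart: in a list s sorted by r, the cyclic successor of the first occurrence of c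
-- is c itself when c occurs twice, else the r-nearest element strictly r-beyond c,
-- else (wrap-around) the r-least element of s.
lemma cyc_next_eq (r : Int → Int → Prop)
    (hanti : ∀ a b, r a b → r b a → a = b)
    (s : List Int) (c : Int) (hc : c ∈ s) (hn : 2 ≤ s.length)
    (mono : ∀ p q (hpq : p ≤ q) (hq : q < s.length), r (s[p]'(lt_of_le_of_lt hpq hq)) s[q])
    (near : Option Int)
    (hnone : near = none → ∀ x ∈ s, r x c)
    (hsome : ∀ u, near = some u → u ∈ s ∧ r c u ∧ u ≠ c ∧ ∀ x ∈ s, ¬ r x c → r u x)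
    (glob : Int) (hglobmem : glob ∈ s) (hglobmin : ∀ x ∈ s, r glob x) :
    s.getD ((s.idxOf c + 1) % s.length) 0 =
      if 2 ≤ s.count c then c else near.getD glob := by
  have hi : s.idxOf c < s.length := List.idxOf_lt_length_of_mem hc
  set i := s.idxOf c with hidef
  have hsi : s[i] = c := List.getElem_idxOf hi
  have hfirst : ∀ j, j < i → ∀ (hj : j < s.length), s[j] ≠ c := by
    intro j hji hjl h
    have := List.not_of_lt_findIdx (p := (· == c)) (xs := s) hji
    simp at this
    exact this h
  -- count c s = 1 + count c (drop (i+1))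
  have hsplit : s.count c = (s.take i).count c + (s.drop i).count c := by
    conv_lhs => rw [← List.take_append_drop i s]
    exact List.count_append
  have htake0 : (s.take i).count c = 0 := by
    rw [List.count_eq_zero]
    intro hmem
    obtain ⟨j, hj, hjs⟩ := List.getElem_of_mem hmem
    have hjlen : j < i := lt_of_lt_of_le hj (by simp [List.length_take])
    rw [List.getElem_take] at hjs
    exact hfirst j hjlen _ hjs
  have hdropcons : s.drop i = c :: s.drop (i + 1) := by
    rw [List.drop_eq_getElem_cons hi, hsi]
  have hcnt : s.count c = 1 + (s.drop (i + 1)).count c := by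
    rw [hsplit, htake0, hdropcons, List.count_cons]
    simp [Nat.add_comm]
  by_cases h2 : 2 ≤ s.count c
  · -- duplicate: s[i+1] = c, cyclic successor is c
    rw [if_pos h2]
    have hpos : 0 < (s.drop (i + 1)).count c := by omega
    obtain ⟨j, hj, hjs⟩ := List.getElem_of_mem (List.count_pos_iff.mp hpos)
    rw [List.getElem_drop] at hjs
    have hjn : i + 1 + j < s.length := by
      have := hj; simp [List.length_drop] at this; omega
    have hi1 : i + 1 < s.length := by omega
    have h1 : r (s[i + 1]'hi1) c := hjs ▸ mono (i + 1) (i + 1 + j) (by omega) hjn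
    have h2' : r c (s[i + 1]'hi1) := hsi ▸ mono i (i + 1) (by omega) hi1
    have hmod : (i + 1) % s.length = i + 1 := Nat.mod_eq_of_lt hi1
    rw [hmod]
    simp [List.getElem?_eq_getElem hi1]
    exact hanti _ _ h1 h2'
  · rw [if_neg h2]
    have hnotin : c ∉ s.drop (i + 1) := by
      rw [← List.count_eq_zero]; omega
    rcases Nat.lt_or_ge (i + 1) s.length with hi1 | hge
    · -- i+1 < n : successor is the nearest element strictly beyond c
      have hne : s[i + 1]'hi1 ≠ c := by
        intro h
        apply hnotin
        have h0 : 0 < (s.drop (i + 1)).length := by simp [List.length_drop]; omega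
        have : (s.drop (i + 1))[0]'h0 = c := by rw [List.getElem_drop]; simpa using h
        exact this ▸ List.getElem_mem h0
      have hrc : r c (s[i + 1]'hi1) := hsi ▸ mono i (i + 1) (by omega) hi1
      cases near with
      | none =>
        exact absurd (hanti _ _ (hnone rfl _ (List.getElem_mem hi1)) hrc) hne
      | some u =>
        obtain ⟨humem, hrcu, hune, humin⟩ := hsome u rfl
        obtain ⟨j, hjl, hjs⟩ := List.getElem_of_mem humem
        have hji : i + 1 ≤ j := by
          by_contra hlt
          have hrjc : r (s[j]'hjl) (s[i]'hi) := mono j i (by omega) hi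
          rw [hjs, hsi] at hrjc
          exact hune ((hanti _ _ hrcu hrjc).symm)
        have hr1 : r (s[i + 1]'hi1) u := hjs ▸ mono (i + 1) j hji hjl
        have hr2 : r u (s[i + 1]'hi1) := by
          apply humin _ (List.getElem_mem hi1)
          intro hback
          exact hne (hanti _ _ hback hrc)
        have hmod : (i + 1) % s.length = i + 1 := Nat.mod_eq_of_lt hi1
        rw [hmod]
        simp [List.getElem?_eq_getElem hi1]
        exact hanti _ _ hr1 hr2
    · -- i is the last index: wrap around to the r-least element
      have hilast : i + 1 = s.length := by omega
      have hmod : (i + 1) % s.length = 0 := by rw [hilast]; exact Nat.mod_self _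
      have h0 : 0 < s.length := by omega
      have hnearnone : near = none := by
        cases near with
        | none => rfl
        | some u =>
          obtain ⟨humem, hrcu, hune, -⟩ := hsome u rfl
          obtain ⟨j, hjl, hjs⟩ := List.getElem_of_mem humem
          have hji : j ≤ i := by omega
          have hrjc : r (s[j]'hjl) (s[i]'hi) := mono j i hji hi
          rw [hjs, hsi] at hrjc
          exact absurd ((hanti _ _ hrcu hrjc).symm) hune
      rw [hmod, hnearnone]
      simp [List.getElem?_eq_getElem h0]
      obtain ⟨j, hjl, hjs⟩ := List.getElem_of_mem hglobmem
      have hr1 : r (s[0]'h0) glob := hjs ▸ mono 0 j (Nat.zero_le j) hjl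
      exact hanti _ _ hr1 (hglobmin _ (List.getElem_mem h0))

-- evaluate A's cyclic successor against B's pass results, forward direction
lemma branch_eval_fwd (lst : List Int) (x0 : Int) (hx0 : x0 ∈ lst) (c : Int)
    (s : List Int) (hperm : s.Perm lst) (hc : c ∈ lst) (hlen : 2 ≤ lst.length)
    (mono : ∀ p q (hpq : p ≤ q) (hq : q < s.length), (s[p]'(lt_of_le_of_lt hpq hq)) ≤ s[q]) :
    s.getD ((s.idxOf c + 1) % s.length) 0 =
      if 2 ≤ lst.count c then c
      else (lst.foldl (upF c) none).getD (lst.foldl mnF x0) := by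
  have hcount : s.count c = lst.count c := hperm.count_eq c
  have hmem : ∀ x, x ∈ s ↔ x ∈ lst := fun x => hperm.mem_iff
  have hlens : s.length = lst.length := hperm.length_eq
  rw [← hcount]
  apply cyc_next_eq (r := fun a b => a ≤ b)
  · intro a b h1 h2; omega
  · exact (hmem c).mpr hc
  · omega
  · exact mono
  · intro hnone x hx
    have := (upF_none_iff c lst none).mp hnone
    have h := this.2 x ((hmem x).mp hx)
    omega
  · intro u hu
    obtain ⟨h1, h2, h3, h4⟩ := upF_some_spec c lst none (fun v hv => by simp at hv) u hu
    refine ⟨(hmem u).mpr (h2.resolve_right (by simp)), by omega, by omega, ?_⟩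
    intro x hx hxc
    exact h4 x ((hmem x).mp hx) (by omega)
  · obtain ⟨h1, h2, h3⟩ := mnF_spec lst x0
    exact (hmem _).mpr (h1.elim (fun e => by rw [e]; exact hx0) id)
  · intro x hx
    obtain ⟨h1, h2, h3⟩ := mnF_spec lst x0
    exact h3 x ((hmem x).mp hx)

-- and the backward direction
lemma branch_eval_bwd (lst : List Int) (x0 : Int) (hx0 : x0 ∈ lst) (c : Int)
    (s : List Int) (hperm : s.Perm lst) (hc : c ∈ lst) (hlen : 2 ≤ lst.length)
    (mono : ∀ p q (hpq : p ≤ q) (hq : q < s.length), s[q] ≤ (s[p]'(lt_of_le_of_lt hpq hq))) :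
    s.getD ((s.idxOf c + 1) % s.length) 0 =
      if 2 ≤ lst.count c then c
      else (lst.foldl (dnF c) none).getD (lst.foldl mxF x0) := by
  have hcount : s.count c = lst.count c := hperm.count_eq c
  have hmem : ∀ x, x ∈ s ↔ x ∈ lst := fun x => hperm.mem_iff
  have hlens : s.length = lst.length := hperm.length_eq
  rw [← hcount]
  apply cyc_next_eq (r := fun a b => b ≤ a)
  · intro a b h1 h2; omega
  · exact (hmem c).mpr hc
  · omega
  · exact mono
  · intro hnone x hx
    have := (dnF_none_iff c lst none).mp hnone
    have h := this.2 x ((hmem x).mp hx)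
    omega
  · intro u hu
    obtain ⟨h1, h2, h3, h4⟩ := dnF_some_spec c lst none (fun v hv => by simp at hv) u hu
    refine ⟨(hmem u).mpr (h2.resolve_right (by simp)), by omega, by omega, ?_⟩
    intro x hx hxc
    exact h4 x ((hmem x).mp hx) (by omega)
  · obtain ⟨h1, h2, h3⟩ := mxF_spec lst x0
    exact (hmem _).mpr (h1.elim (fun e => by rw [e]; exact hx0) id)
  · intro x hx
    obtain ⟨h1, h2, h3⟩ := mxF_spec lst x0
    exact h3 x ((hmem x).mp hx)

lemma sorted_mono_fwd (lst : List Int) :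
    ∀ p q (hpq : p ≤ q) (hq : q < (PySem.List.sorted lst (fun x => x) false).length),
      ((PySem.List.sorted lst (fun x => x) false)[p]'(lt_of_le_of_lt hpq hq)) ≤
        (PySem.List.sorted lst (fun x => x) false)[q] := by
  intro p q hpq hq
  rcases Nat.lt_or_ge p q with h | h
  · exact List.pairwise_iff_getElem.mp (PySem.List.sorted_pairwise lst (fun x => x)) p q _ hq h
  · have : p = q := by omega
    subst this; exact le_refl _

lemma sorted_mono_bwd (lst : List Int) :
    ∀ p q (hpq : p ≤ q) (hq : q < (PySem.List.sorted lst (fun x => x) true).length),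
      (PySem.List.sorted lst (fun x => x) true)[q] ≤
        ((PySem.List.sorted lst (fun x => x) true)[p]'(lt_of_le_of_lt hpq hq)) := by
  intro p q hpq hq
  rcases Nat.lt_or_ge p q with h | h
  · exact List.pairwise_iff_getElem.mp (PySem.List.sorted_pairwise_rev lst (fun x => x)) p q _ hq h
  · have : p = q := by omega
    subst this; exact le_refl _

-- A's loop on the sorted list returns the cyclic successor of the first occurrence of c
lemma loop_eval (lst : List Int) (c : Int) (b : Bool) (hc : c ∈ lst) :
    nunCycleLoop (PySem.List.sorted lst (fun x => x) b) c 0 (lst.length + 1) =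
      some ((PySem.List.sorted lst (fun x => x) b).getD
        (((PySem.List.sorted lst (fun x => x) b).idxOf c + 1) %
          (PySem.List.sorted lst (fun x => x) b).length) 0) := by
  set s := PySem.List.sorted lst (fun x => x) b with hs
  have hcs : c ∈ s := (PySem.List.mem_sorted lst (fun x => x) b c).mpr hc
  have hi : s.idxOf c < s.length := List.idxOf_lt_length_of_mem hcs
  have hlen : s.length = lst.length := PySem.List.length_sorted lst (fun x => x) b
  apply nunCycleLoop_run s c (s.idxOf c) hi
  · intro j hj h
    have := List.not_of_lt_findIdx (p := (· == c)) (xs := s) hj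
    simp at this
    exact this h
  · exact List.getElem_idxOf hi
  · exact Nat.zero_le _
  · omega

-- ===== VERDICT (by name: the statement is the Claim_ definition above) =====
theorem next_unordered_number_spec : Claim_equal_next_unordered_number := by
  intro lst c backward _
  unfold Spec_next_unordered_number
  cases lst with
  | nil => rfl
  | cons x0 t =>
    simp only [next_unordered_number, next_unordered_number_alt, nunFold_eq]
    have hcnt : (x0 :: t).foldl (cntF c) 0 = ((x0 :: t).count c : Int) := by
      rw [cntF_spec]; omega
    by_cases hmem : c ∈ x0 :: t
    · have hcntpos : 0 < (x0 :: t).count c := List.count_pos_iff.mpr hmem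
      by_cases hone : (x0 :: t).length = 1
      · rw [if_pos (Or.inr hone), if_pos (Or.inr hone)]
      · have hlen : 2 ≤ (x0 :: t).length := by
          have : 1 ≤ (x0 :: t).length := by simp
          omega
        rw [if_neg (by rintro (h | h) <;> [exact h hmem; exact hone h]),
            if_neg (by rintro (h | h) <;> [(rw [hcnt] at h; omega); exact hone h])]
        rw [loop_eval (x0 :: t) c backward hmem]
        simp only [Option.getD_some]
        cases backward with
        | false =>
          rw [branch_eval_fwd (x0 :: t) x0 (List.mem_cons_self) c _
                (PySem.List.sorted_perm (x0 :: t) (fun x => x) false) hmem hlen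
                (sorted_mono_fwd (x0 :: t))]
          by_cases h2 : 2 ≤ (x0 :: t).count c
          · rw [if_pos h2, if_pos (by rw [hcnt]; exact_mod_cast h2)]
          · rw [if_neg h2, if_neg (by rw [hcnt]; exact_mod_cast h2)]
            simp
        | true =>
          rw [branch_eval_bwd (x0 :: t) x0 (List.mem_cons_self) c _
                (PySem.List.sorted_perm (x0 :: t) (fun x => x) true) hmem hlen
                (sorted_mono_bwd (x0 :: t))]
          by_cases h2 : 2 ≤ (x0 :: t).count c
          · rw [if_pos h2, if_pos (by rw [hcnt]; exact_mod_cast h2)]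
          · rw [if_neg h2, if_neg (by rw [hcnt]; exact_mod_cast h2)]
            simp
    · have hcnt0 : (x0 :: t).count c = 0 := List.count_eq_zero.mpr hmem
      rw [if_pos (Or.inl hmem), if_pos (Or.inl (by rw [hcnt, hcnt0]; rfl))]
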